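-- pv_equiv track=rewrite | github.com/iphilipenko/GeoRetail | src/graph/neo4j_client.py | _categorize_poi
-- ===== SOURCE A (Python) =====
-- def _categorize_poi(amenity: str, poi_type: str) -> str:
--     """Categorize POI for retail analysis"""
--     retail_categories = {
--         "food": ["restaurant", "cafe", "fast_food", "food_court", "bar", "pub"],
--         "shopping": ["supermarket", "convenience", "department_store", "mall", "shop"],
--         "services": ["bank", "atm", "pharmacy", "hospital", "clinic", "post_office"],
--         "education": ["school", "university", "college", "kindergarten", "library"],
--         "transport": ["bus_station", "subway_entrance", "parking", "fuel"],
--         "leisure": ["cinema", "theatre", "park", "fitness_centre", "gym"],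
--         "accommodation": ["hotel", "hostel", "guest_house"]
--     }
--
--     amenity_lower = amenity.lower() if amenity else ""
--
--     for category, keywords in retail_categories.items():
--         if amenity_lower in keywords:
--             return category
--
--     return "other"
-- ===== SOURCE B (Python) =====
-- _POI_INDEX = {
--     "restaurant": "food", "cafe": "food", "fast_food": "food", "food_court": "food",
--     "bar": "food", "pub": "food",
--     "supermarket": "shopping", "convenience": "shopping", "department_store": "shopping",
--     "mall": "shopping", "shop": "shopping",
--     "bank": "services", "atm": "services", "pharmacy": "services", "hospital": "services",
--     "clinic": "services", "post_office": "services",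
--     "school": "education", "university": "education", "college": "education",
--     "kindergarten": "education", "library": "education",
--     "bus_station": "transport", "subway_entrance": "transport", "parking": "transport",
--     "fuel": "transport",
--     "cinema": "leisure", "theatre": "leisure", "park": "leisure",
--     "fitness_centre": "leisure", "gym": "leisure",
--     "hotel": "accommodation", "hostel": "accommodation", "guest_house": "accommodation",
-- }
--
--
-- def _categorize_poi(amenity: str, poi_type: str) -> str:
--     """Categorize POI for retail analysis"""
--     amenity_lower = amenity.lower() if amenity else ""
--     return _POI_INDEX.get(amenity_lower, "other")
-- ===== Notes on version B (the rewrite author's own statement) =====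
-- stated objective: idiomatic
-- what changed: Replaced the per-call loop over the category dict with a module-level flat inverted index (keyword -> category) consulted by a single dict .get with default 'other'.
import Mathlib
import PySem

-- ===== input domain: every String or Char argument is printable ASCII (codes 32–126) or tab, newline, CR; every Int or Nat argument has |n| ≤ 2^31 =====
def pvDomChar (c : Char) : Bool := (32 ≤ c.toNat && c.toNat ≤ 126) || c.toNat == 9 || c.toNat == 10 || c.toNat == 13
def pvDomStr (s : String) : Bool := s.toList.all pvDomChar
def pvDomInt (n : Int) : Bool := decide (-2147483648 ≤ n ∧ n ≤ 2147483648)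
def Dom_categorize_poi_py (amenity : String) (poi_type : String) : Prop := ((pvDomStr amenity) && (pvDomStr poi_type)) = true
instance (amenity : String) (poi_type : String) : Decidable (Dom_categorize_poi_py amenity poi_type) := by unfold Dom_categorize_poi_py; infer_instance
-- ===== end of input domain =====

-- B replaces A's per-call scan over the category→keywords dict with a precomputed
-- flat keyword→category index and a single .get lookup (idiomatic; same results).

-- ===== PORT A =====
-- A's retail_categories dict, in insertion order.
def pvACats : List (String × List String) :=
  [("food", ["restaurant", "cafe", "fast_food", "food_court", "bar", "pub"]),
   ("shopping", ["supermarket", "convenience", "department_store", "mall", "shop"]),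
   ("services", ["bank", "atm", "pharmacy", "hospital", "clinic", "post_office"]),
   ("education", ["school", "university", "college", "kindergarten", "library"]),
   ("transport", ["bus_station", "subway_entrance", "parking", "fuel"]),
   ("leisure", ["cinema", "theatre", "park", "fitness_centre", "gym"]),
   ("accommodation", ["hotel", "hostel", "guest_house"])]

-- A's 'for category, keywords in retail_categories.items(): if amenity_lower in keywords: return category'
def pvCatLoop (key : String) : List (String × List String) → String
  | [] => "other"
  | (c, ks) :: rest => if ks.contains key then c else pvCatLoop key rest

def categorize_poi_py (amenity : String) (_poi_type : String) : String :=
  let amenity_lower := if amenity ≠ "" then PySem.Str.lower amenity else ""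
  pvCatLoop amenity_lower pvACats

-- ===== PORT B =====
-- Source B's module-level _POI_INDEX literal dict.
def pvPoiIndex : PySem.Dict String String :=
  PySem.Dict.ofList
    [("restaurant", "food"), ("cafe", "food"), ("fast_food", "food"), ("food_court", "food"),
     ("bar", "food"), ("pub", "food"),
     ("supermarket", "shopping"), ("convenience", "shopping"), ("department_store", "shopping"),
     ("mall", "shopping"), ("shop", "shopping"),
     ("bank", "services"), ("atm", "services"), ("pharmacy", "services"), ("hospital", "services"),
     ("clinic", "services"), ("post_office", "services"),
     ("school", "education"), ("university", "education"), ("college", "education"),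
     ("kindergarten", "education"), ("library", "education"),
     ("bus_station", "transport"), ("subway_entrance", "transport"), ("parking", "transport"),
     ("fuel", "transport"),
     ("cinema", "leisure"), ("theatre", "leisure"), ("park", "leisure"),
     ("fitness_centre", "leisure"), ("gym", "leisure"),
     ("hotel", "accommodation"), ("hostel", "accommodation"), ("guest_house", "accommodation")]

def categorize_poi_py_alt (amenity : String) (_poi_type : String) : String :=
  let amenity_lower := if amenity ≠ "" then PySem.Str.lower amenity else ""
  pvPoiIndex.getD amenity_lower "other"

-- ===== PRECONDITION & SPEC =====
def Spec_categorize_poi_py (amenity : String) (poi_type : String) (out : String) : Prop := out = categorize_poi_py_alt amenity poi_type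
instance (amenity : String) (poi_type : String) (out : String) : Decidable (Spec_categorize_poi_py amenity poi_type out) := by unfold Spec_categorize_poi_py; infer_instance

-- ===== CLAIM (what is proved, stated in full; the proofs are below) =====
def Claim_equal_categorize_poi_py : Prop := ∀ (amenity : String) (poi_type : String), Dom_categorize_poi_py amenity poi_type → Spec_categorize_poi_py amenity poi_type (categorize_poi_py amenity poi_type)

-- ===== LEMMAS AND PROOFS =====

-- get? of a block of keywords all mapped to the same category.
lemma pv_get?_block (key c : String) (ks : List String) (rest : List (String × String)) :
    (PySem.Dict.mk (ks.map (fun k => (k, c)) ++ rest)).get? key =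
      if ks.contains key then some c else (PySem.Dict.mk rest).get? key := by
  induction ks with
  | nil => simp
  | cons k ks ih =>
    simp only [List.map_cons, List.cons_append, PySem.Dict.get?_mk_cons, ih, List.contains_cons]
    by_cases h : k = key
    · simp [h]
    · simp [h, Ne.symm h]

-- A's loop over categories equals a first-match lookup in the flattened keyword→category list.
lemma pv_loop_eq_lookup (key : String) (cats : List (String × List String)) :
    pvCatLoop key cats =
      ((PySem.Dict.mk (cats.flatMap (fun p => p.2.map (fun k => (k, p.1))))).get? key).getD "other" := by
  induction cats with
  | nil => simp [pvCatLoop, PySem.Dict.get?]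
  | cons p rest ih =>
    obtain ⟨c, ks⟩ := p
    simp only [pvCatLoop, List.flatMap_cons, pv_get?_block]
    by_cases h : key ∈ ks <;> simp [h, ih]

-- The flat index Source B writes out literally is the flattening of A's category dict.
lemma pv_index_eq : pvPoiIndex = PySem.Dict.mk (pvACats.flatMap (fun p => p.2.map (fun k => (k, p.1)))) := by
  decide

-- ===== VERDICT (by name: the statement is the Claim_ definition above) =====
theorem categorize_poi_py_spec : Claim_equal_categorize_poi_py := by
  intro amenity poi_type _
  unfold Spec_categorize_poi_py categorize_poi_py categorize_poi_py_alt
  simp only [pv_loop_eq_lookup, pv_index_eq, PySem.Dict.getD]
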